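-- pv_equiv track=rewrite | github.com/IIpapuII/Edu_python | generadores/gen7.py | multiplos_rango
-- ===== SOURCE A (Python) =====
-- def multiplos_rango(rango):
--     num = 1
--     dat = rango
--     while num < rango:
--         dato = num % 100
--         if dato == 0:
--             dat = dat +1
--         else:
--             dat = rango % dato
--         if (dat == 0):
--             yield num
--         num = num+1
-- ===== SOURCE B (Python) =====
-- def multiplos_rango(rango):
--     # precompute the residues mod 100 that divide rango, in increasing order
--     residues = [r for r in range(1, 100) if rango % r == 0]
--     base = 0
--     while base < rango:
--         for r in residues:
--             n = base + r
--             if n < rango: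
--                 yield n
--         base += 100
-- ===== Notes on version B (the rewrite author's own statement) =====
-- stated objective: faster
-- what changed: B precomputes once the residues mod 100 that divide rango and then walks blocks of 100 emitting base+r for each precomputed residue, instead of scanning every integer below rango and taking a modulo (and a second modulo) for each.
import Mathlib
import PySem

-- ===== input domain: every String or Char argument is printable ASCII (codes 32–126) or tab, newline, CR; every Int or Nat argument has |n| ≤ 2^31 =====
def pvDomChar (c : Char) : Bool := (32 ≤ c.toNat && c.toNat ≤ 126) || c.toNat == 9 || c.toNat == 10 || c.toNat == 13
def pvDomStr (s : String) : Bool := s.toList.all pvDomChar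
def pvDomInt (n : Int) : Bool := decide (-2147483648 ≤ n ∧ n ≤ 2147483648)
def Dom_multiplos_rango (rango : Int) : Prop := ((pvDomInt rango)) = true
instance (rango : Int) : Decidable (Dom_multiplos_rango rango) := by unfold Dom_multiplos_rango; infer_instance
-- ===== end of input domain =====

-- B replaces A's scan of every integer below rango (a modulo per integer) by a precomputed
-- table of the residues mod 100 that divide rango, emitted block of 100 by block of 100;
-- objective: faster by a constant factor (same increasing output sequence).

-- ===== PORT A =====
-- the while-loop of A: state (num, dat)
def mrLoopA (rango num dat : Int) : List Int :=
  if num < rango then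
    let dato := PySem.Int.mod num 100
    let dat' := if dato = 0 then dat + 1 else PySem.Int.mod rango dato
    (if dat' = 0 then [num] else []) ++ mrLoopA rango (num + 1) dat'
  else []
termination_by (rango - num).toNat
decreasing_by omega

def multiplos_rango (rango : Int) : List Int :=
  mrLoopA rango 1 rango

-- ===== PORT B =====
-- the while-loop of B over base = 0, 100, 200, …; the inner for/if is the filterMap
def mrBlocksB (rango : Int) (residues : List Int) (base : Int) : List Int :=
  if base < rango then
    (residues.filterMap (fun r => if base + r < rango then some (base + r) else none))
      ++ mrBlocksB rango residues (base + 100)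
  else []
termination_by (rango - base).toNat
decreasing_by omega

def multiplos_rango_alt (rango : Int) : List Int :=
  mrBlocksB rango
    ((PySem.List.pyRange 1 100 1).filter (fun r => PySem.Int.mod rango r == 0)) 0

-- ===== PRECONDITION & SPEC =====
def Spec_multiplos_rango (rango : Int) (out : List Int) : Prop := out = multiplos_rango_alt rango
instance (rango : Int) (out : List Int) : Decidable (Spec_multiplos_rango rango out) := by unfold Spec_multiplos_rango; infer_instance

-- ===== CLAIM (what is proved, stated in full; the proofs are below) =====
def Claim_equal_multiplos_rango : Prop := ∀ (rango : Int), Dom_multiplos_rango rango → Spec_multiplos_rango rango (multiplos_rango rango)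

-- ===== LEMMAS AND PROOFS =====

-- common reference: one pass over all integers, yielding n iff n % 100 ≠ 0 and rango % (n % 100) = 0
def mrGo (rango num : Int) : List Int :=
  if num < rango then
    (if PySem.Int.mod num 100 ≠ 0 ∧ PySem.Int.mod rango (PySem.Int.mod num 100) = 0
     then [num] else []) ++ mrGo rango (num + 1)
  else []
termination_by (rango - num).toNat
decreasing_by omega

-- the inner filterMap of a block
def mrF (rango base : Int) (l : List Int) : List Int :=
  l.filterMap (fun r => if base + r < rango then some (base + r) else none)

theorem mrLoopA_eq_go (rango : Int) : ∀ (n : Nat) (num dat : Int),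
    n = (rango - num).toNat → 0 ≤ dat → mrLoopA rango num dat = mrGo rango num := by
  intro n
  induction n using Nat.strong_induction_on with
  | _ n ih =>
    intro num dat hn hdat
    rw [mrLoopA, mrGo]
    by_cases h : num < rango
    · rw [if_pos h, if_pos h]
      show (let dato := PySem.Int.mod num 100;
            let dat' := if dato = 0 then dat + 1 else PySem.Int.mod rango dato;
            (if dat' = 0 then [num] else []) ++ mrLoopA rango (num + 1) dat') = _
      simp only []
      have hm : PySem.Int.mod num 100 = num % 100 := PySem.Int.mod_eq_emod_of_pos (by norm_num)
      have hmb : 0 ≤ num % 100 ∧ num % 100 < 100 := ⟨Int.emod_nonneg _ (by norm_num), Int.emod_lt_of_pos _ (by norm_num)⟩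
      by_cases h0 : PySem.Int.mod num 100 = 0
      · -- dato = 0: dat' = dat + 1 ≠ 0, nothing yielded
        rw [if_pos h0]
        have h1 : ¬ (dat + 1 = 0) := by omega
        rw [if_neg h1, if_neg (fun hc => hc.1 h0)]
        simp only [List.nil_append]
        exact ih (rango - (num+1)).toNat (by omega) (num+1) (dat+1) rfl (by omega)
      · -- dato > 0: dat' = rango % dato ≥ 0
        rw [if_neg h0]
        have hdpos : 0 < PySem.Int.mod num 100 := by rw [hm] at h0 ⊢; omega
        have hd' : 0 ≤ PySem.Int.mod rango (PySem.Int.mod num 100) := by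
          rw [PySem.Int.mod_eq_emod_of_pos hdpos]
          exact Int.emod_nonneg _ (by omega)
        rw [ih (rango - (num+1)).toNat (by omega) (num+1) _ rfl hd']
        by_cases hz : PySem.Int.mod rango (PySem.Int.mod num 100) = 0
        · rw [if_pos hz, if_pos ⟨h0, hz⟩]
        · rw [if_neg hz, if_neg (fun hc => hz hc.2)]
    · rw [if_neg h, if_neg h]

-- split a strictly increasing list's ≥ k filter at k
theorem mrSplit (l : List Int) (hp : l.Pairwise (· < ·)) (k : Int) :
    l.filter (fun r => decide (k ≤ r)) =
      (if k ∈ l then [k] else []) ++ l.filter (fun r => decide (k + 1 ≤ r)) := by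
  induction l with
  | nil => simp
  | cons x t iht =>
    have hx : ∀ y ∈ t, x < y := fun y hy => (List.pairwise_cons.mp hp).1 y hy
    have hpt : t.Pairwise (· < ·) := (List.pairwise_cons.mp hp).2
    by_cases hlt : x < k
    · have h1 : (decide (k ≤ x)) = false := by simp; omega
      have h2 : (decide (k + 1 ≤ x)) = false := by simp; omega
      have hmemiff : (k ∈ x :: t) ↔ (k ∈ t) := by
        constructor
        · intro h
          rcases List.mem_cons.mp h with h | h
          · omega
          · exact h
        · exact fun h => List.mem_cons_of_mem _ h
      rw [List.filter_cons, List.filter_cons, h1, h2, if_congr hmemiff rfl rfl]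
      simpa using iht hpt
    · by_cases heq : x = k
      · subst heq
        have h1 : (decide (x ≤ x)) = true := by simp
        have h2 : (decide (x + 1 ≤ x)) = false := by simp
        have hfilt : t.filter (fun r => decide (x ≤ r)) = t.filter (fun r => decide (x + 1 ≤ r)) := by
          apply List.filter_congr
          intro y hy
          have := hx y hy
          simp only [decide_eq_decide]
          omega
        rw [List.filter_cons, List.filter_cons, h1, h2, if_pos List.mem_cons_self, hfilt]
        simp
      · have hgt : k < x := by omega
        have h1 : (decide (k ≤ x)) = true := by simp; omega
        have h2 : (decide (k + 1 ≤ x)) = true := by simp; omega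
        have hnm : k ∉ x :: t := by
          intro h
          rcases List.mem_cons.mp h with h | h
          · omega
          · exact absurd (hx k h) (by omega)
        have hfilt : t.filter (fun r => decide (k ≤ r)) = t.filter (fun r => decide (k + 1 ≤ r)) := by
          apply List.filter_congr
          intro y hy
          have := hx y hy
          simp only [decide_eq_decide]
          omega
        rw [List.filter_cons, List.filter_cons, h1, h2, if_neg hnm, hfilt]
        simp

-- one block: go over base+k, …, base+100 equals the filtered residue table ≥ k plus the next block's go
theorem mrBlockStep (rango base : Int) (rs : List Int)
    (hrs : ∀ r, r ∈ rs ↔ 1 ≤ r ∧ r ≤ 99 ∧ PySem.Int.mod rango r = 0)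
    (hp : rs.Pairwise (· < ·)) (hbm : base % 100 = 0) :
    ∀ (j : Nat), j ≤ 99 →
      mrGo rango (base + (100 - (j : Int))) =
        mrF rango base (rs.filter (fun r => decide ((100 - (j : Int)) ≤ r)))
          ++ mrGo rango (base + 101) := by
  intro j
  induction j with
  | zero =>
    intro _
    have hempty : rs.filter (fun r => decide ((100 - (0:Nat) : Int) ≤ r)) = [] := by
      apply List.filter_eq_nil_iff.mpr
      intro r hr
      have := (hrs r).mp hr
      simp only [decide_eq_true_eq]
      push_cast
      omega
    rw [hempty]
    simp only [mrF, List.filterMap_nil, List.nil_append]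
    rw [mrGo]
    by_cases h : base + (100 - (0:Nat) : Int) < rango
    · rw [if_pos h]
      have hm : PySem.Int.mod (base + (100 - (0:Nat) : Int)) 100 = 0 := by
        rw [PySem.Int.mod_eq_emod_of_pos (by norm_num)]
        push_cast
        omega
      have hnP : ¬ (PySem.Int.mod (base + (100 - (0:Nat) : Int)) 100 ≠ 0 ∧
          PySem.Int.mod rango (PySem.Int.mod (base + (100 - (0:Nat) : Int)) 100) = 0) :=
        fun hc => hc.1 hm
      rw [if_neg hnP]
      simp only [List.nil_append]
      congr 1
      push_cast
      ring
    · rw [if_neg h]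
      rw [mrGo, if_neg (by push_cast at h ⊢; omega)]
  | succ j ihj =>
    intro hj
    simp only [Nat.cast_add, Nat.cast_one]
    set k : Int := 100 - ((j : Int) + 1) with hk
    have hk1 : 1 ≤ k := by omega
    have hk99 : k ≤ 99 := by omega
    rw [mrGo]
    by_cases h : base + k < rango
    · rw [if_pos h]
      have hm : PySem.Int.mod (base + k) 100 = k := by
        rw [PySem.Int.mod_eq_emod_of_pos (by norm_num)]
        omega
      have hnext : base + k + 1 = base + (100 - (j : Int)) := by omega
      rw [hm, hnext, ihj (by omega)]
      have hkk : rs.filter (fun r => decide ((100 - (j:Int)) ≤ r)) = rs.filter (fun r => decide (k + 1 ≤ r)) := by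
        apply List.filter_congr
        intro y _
        simp only [decide_eq_decide]
        omega
      rw [hkk, mrSplit rs hp k]
      simp only [mrF, List.filterMap_append, List.append_assoc]
      congr 1
      by_cases hmem : k ∈ rs
      · have hP : PySem.Int.mod rango k = 0 := ((hrs k).mp hmem).2.2
        rw [if_pos hmem, if_pos ⟨by omega, hP⟩]
        simp only [List.filterMap_cons, List.filterMap_nil]
        rw [if_pos h]
      · have hnP : ¬ (k ≠ 0 ∧ PySem.Int.mod rango k = 0) := by
          rintro ⟨-, hz⟩
          exact hmem ((hrs k).mpr ⟨hk1, hk99, hz⟩)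
        rw [if_neg hmem, if_neg hnP]
        simp
    · -- base + k ≥ rango: everything empty
      rw [if_neg h]
      have h1 : mrF rango base (rs.filter (fun r => decide (k ≤ r))) = [] := by
        apply List.filterMap_eq_nil_iff.mpr
        intro r hr
        have hge : k ≤ r := by
          have := List.of_mem_filter hr
          simpa using this
        rw [if_neg (by omega)]
      have h2 : mrGo rango (base + 101) = [] := by
        rw [mrGo, if_neg (by omega)]
      rw [h1, h2]
      simp

-- B's block loop equals the one-pass go, for base a nonneg multiple of 100
theorem mrBlocksB_eq_go (rango : Int) (rs : List Int)
    (hrs : ∀ r, r ∈ rs ↔ 1 ≤ r ∧ r ≤ 99 ∧ PySem.Int.mod rango r = 0)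
    (hp : rs.Pairwise (· < ·)) :
    ∀ (n : Nat) (base : Int), n = (rango - base).toNat → base % 100 = 0 →
      mrBlocksB rango rs base = mrGo rango (base + 1) := by
  intro n
  induction n using Nat.strong_induction_on with
  | _ n ih =>
    intro base hn hbm
    rw [mrBlocksB]
    by_cases h : base < rango
    · rw [if_pos h]
      have hall : rs.filter (fun r => decide ((100 - ((99:Nat) : Int)) ≤ r)) = rs := by
        apply List.filter_eq_self.mpr
        intro r hr
        have := (hrs r).mp hr
        simp only [decide_eq_true_eq]
        push_cast
        omega
      have hstep := mrBlockStep rango base rs hrs hp hbm 99 (le_refl _)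
      rw [hall] at hstep
      have hb1 : base + (100 - ((99:Nat) : Int)) = base + 1 := by push_cast; ring
      rw [hb1] at hstep
      rw [hstep]
      congr 1
      have : base + 101 = (base + 100) + 1 := by ring
      rw [this]
      exact ih (rango - (base+100)).toNat (by omega) (base+100) rfl (by omega)
    · rw [if_neg h]
      rw [mrGo, if_neg (by omega)]

-- ===== VERDICT (by name: the statement is the Claim_ definition above) =====
theorem multiplos_rango_spec : Claim_equal_multiplos_rango := by
  intro rango _
  unfold Spec_multiplos_rango multiplos_rango multiplos_rango_alt
  set rs := (PySem.List.pyRange 1 100 1).filter (fun r => PySem.Int.mod rango r == 0) with hrsdef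
  have hrs : ∀ r, r ∈ rs ↔ 1 ≤ r ∧ r ≤ 99 ∧ PySem.Int.mod rango r = 0 := by
    intro r
    rw [hrsdef, List.mem_filter, PySem.List.mem_pyRange_one]
    simp only [beq_iff_eq]
    omega
  have hp : rs.Pairwise (· < ·) := by
    exact List.Pairwise.filter _ (PySem.List.pairwise_lt_pyRange_one 1 100)
  rw [mrBlocksB_eq_go rango rs hrs hp (rango - 0).toNat 0 (by omega) (by omega)]
  by_cases h0 : 0 ≤ rango
  · exact mrLoopA_eq_go rango (rango - 1).toNat 1 rango rfl h0
  · rw [mrLoopA, if_neg (by omega), mrGo, if_neg (by omega)]
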